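-- pv_equiv track=rewrite | github.com/MrBrantCode/unitest_baseline | mut_generate/mist_train_cf/cf_16652/solution.py | count_string_characters
-- ===== SOURCE A (Python) =====
-- def count_string_characters(string):
--     # Remove whitespace characters from the string
--     string = string.replace(" ", "")
--
--     # Initialize variables to count length and unique characters
--     length = len(string)
--     unique_chars = set(string)
--
--     # Initialize variables to count special characters and digits
--     special_chars = 0
--     digits = 0
--
--     # Iterate over each character in the string
--     for char in string:
--         # Check if the character is a special character
--         if not char.isalpha() and not char.isdigit():
--             special_chars += 1
--         # Check if the character is a digit
--         if char.isdigit():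
--             digits += 1
--
--     # Return the results
--     return length, len(unique_chars), special_chars, digits
-- ===== SOURCE B (Python) =====
-- def count_string_characters(string):
--     # Remove spaces, then reduce over a character-frequency table
--     string = string.replace(" ", "")
--     freq = {}
--     for c in string:
--         freq[c] = freq.get(c, 0) + 1
--     special_chars = 0
--     digits = 0
--     for c, n in freq.items():
--         if c.isdigit():
--             digits += n
--         elif not c.isalpha():
--             special_chars += n
--     return len(string), len(freq), special_chars, digits
-- ===== Notes on version B (the rewrite author's own statement) =====
-- stated objective: alternative
-- what changed: B builds a character-frequency dictionary in one pass and then derives unique/special/digit counts by a weighted reduction over the distinct-character histogram, instead of A's separate set plus per-character classification scan.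
import Mathlib
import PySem

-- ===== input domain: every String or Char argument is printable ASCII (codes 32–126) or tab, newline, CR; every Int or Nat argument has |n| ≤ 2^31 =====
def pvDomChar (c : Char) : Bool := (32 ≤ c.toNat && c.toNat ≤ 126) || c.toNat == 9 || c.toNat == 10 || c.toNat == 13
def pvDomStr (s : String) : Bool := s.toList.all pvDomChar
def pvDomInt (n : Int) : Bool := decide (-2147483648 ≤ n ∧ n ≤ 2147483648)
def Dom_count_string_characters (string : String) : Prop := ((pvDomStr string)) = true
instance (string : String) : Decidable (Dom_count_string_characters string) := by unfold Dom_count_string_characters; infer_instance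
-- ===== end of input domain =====

-- B replaces A's per-character scan by a reduction over a character-frequency table (simpler on repeat-heavy input).

-- ===== PORT A =====
-- literal transliteration: remove spaces, length, set of chars, then one loop
-- with two independent ifs accumulating (special_chars, digits)
def count_string_characters (string : String) : Int × Int × Int × Int :=
  let cs := PySem.Chars.replace string.toList [' '] []
  let length : Int := PySem.List.len cs
  let unique_chars : PySem.Set Char := PySem.Set.ofList cs
  let sd : Int × Int := cs.foldl (fun p char =>
      let special_chars := if !(PySem.Chars.isalpha char) && !(PySem.Chars.isdigit char)
                           then p.1 + 1 else p.1
      let digits := if PySem.Chars.isdigit char then p.2 + 1 else p.2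
      (special_chars, digits)) (0, 0)
  (length, PySem.Set.len unique_chars, sd.1, sd.2)

-- ===== PORT B =====
-- transliteration of Source B: build the frequency dict with get-default + 1,
-- then fold over its items weighting each distinct char by its count
def count_string_characters_alt (string : String) : Int × Int × Int × Int :=
  let cs := PySem.Chars.replace string.toList [' '] []
  let freq : PySem.Dict Char Int :=
    cs.foldl (fun d c => d.insert c (d.getD c 0 + 1)) PySem.Dict.empty
  let sd : Int × Int := freq.items.foldl (fun p cn =>
      if PySem.Chars.isdigit cn.1 then (p.1, p.2 + cn.2)
      else if !(PySem.Chars.isalpha cn.1) then (p.1 + cn.2, p.2)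
      else p) (0, 0)
  (PySem.List.len cs, PySem.List.len freq.items, sd.1, sd.2)

-- ===== PRECONDITION & SPEC =====
def Spec_count_string_characters (string : String) (out : Int × Int × Int × Int) : Prop := out = count_string_characters_alt string
instance (string : String) (out : Int × Int × Int × Int) : Decidable (Spec_count_string_characters string out) := by unfold Spec_count_string_characters; infer_instance

-- ===== CLAIM (what is proved, stated in full; the proofs are below) =====
def Claim_equal_count_string_characters : Prop := ∀ (string : String), Dom_count_string_characters string → Spec_count_string_characters string (count_string_characters string)

-- ===== LEMMAS AND PROOFS =====

-- a pair-foldl that adds componentwise is the pair of mapped sums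
theorem pv_foldl_pair_add {α : Type} (f g : α → Int) (l : List α) (a b : Int) :
    l.foldl (fun p x => (p.1 + f x, p.2 + g x)) (a, b)
      = (a + (l.map f).sum, b + (l.map g).sum) := by
  induction l generalizing a b with
  | nil => simp
  | cons x xs ih => simp [ih, add_assoc]

-- summing 'if k = c then x k else 0' over a nodup list picks out c (or 0)
theorem pv_sum_pick {α : Type} [DecidableEq α] (l : List α) (hl : l.Nodup)
    (c : α) (x : α → Int) :
    (l.map (fun k => if k = c then x k else 0)).sum = if c ∈ l then x c else 0 := by
  induction l with
  | nil => simp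
  | cons k rest ih =>
    rcases List.nodup_cons.mp hl with ⟨hk, hr⟩
    simp only [List.map_cons, List.sum_cons, ih hr, List.mem_cons]
    by_cases h : k = c
    · subst h; simp [hk]
    · simp [h, Ne.symm h]

-- weighting each distinct element of a nodup cover by its count = summing indicators
theorem pv_sum_count {α : Type} [DecidableEq α] (p : α → Bool) (cs l : List α)
    (hl : l.Nodup) (hcov : ∀ c ∈ cs, c ∈ l) :
    (l.map (fun k => if p k then (cs.count k : Int) else 0)).sum
      = (cs.map (fun c => if p c then (1 : Int) else 0)).sum := by
  induction cs with
  | nil => simp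
  | cons c cs' ih =>
    have hcov' : ∀ x ∈ cs', x ∈ l := fun x hx => hcov x (List.mem_cons_of_mem _ hx)
    have hstep : (l.map (fun k => if p k then ((c :: cs').count k : Int) else 0)).sum
        = (l.map (fun k => if p k then (cs'.count k : Int) else 0)).sum
          + (l.map (fun k => if k = c then (if p k then (1 : Int) else 0) else 0)).sum := by
      rw [← List.sum_map_add]
      apply congrArg
      apply List.map_congr_left
      intro k _
      by_cases hkc : k = c
      · subst hkc
        by_cases hp : p k <;> simp [hp]
      · have : (c :: cs').count k = cs'.count k := by
          simp [Ne.symm hkc]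
        simp [this, hkc]
    rw [hstep, ih hcov', pv_sum_pick l hl c (fun k => if p k then (1:Int) else 0),
      if_pos (hcov c List.mem_cons_self)]
    simp [add_comm]

-- B's freq loop is Counter, its items are the distinct chars with their counts
theorem pv_freq_items (cs : List Char) :
    ((cs.foldl (fun d c => d.insert c (d.getD c 0 + 1)) PySem.Dict.empty :
        PySem.Dict Char Int)).items
      = (PySem.Set.ofList cs).map (fun k => (k, (cs.count k : Int))) := by
  rw [PySem.Dict.foldl_insert_getD_add_one_eq_counter]
  exact PySem.Dict.items_counter cs

-- B's if/elif step equals componentwise addition of weighted indicators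
theorem pv_alt_fold (its : List (Char × Int)) (a b : Int) :
    its.foldl (fun p cn =>
        if PySem.Chars.isdigit cn.1 then (p.1, p.2 + cn.2)
        else if !(PySem.Chars.isalpha cn.1) then (p.1 + cn.2, p.2)
        else p) (a, b)
      = its.foldl (fun p cn =>
          (p.1 + (if !(PySem.Chars.isalpha cn.1) && !(PySem.Chars.isdigit cn.1) then cn.2 else 0),
           p.2 + (if PySem.Chars.isdigit cn.1 then cn.2 else 0))) (a, b) := by
  induction its generalizing a b with
  | nil => rfl
  | cons cn rest ih =>
    simp only [List.foldl_cons]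
    rw [ih]
    by_cases hd : PySem.Chars.isdigit cn.1 <;>
      by_cases ha : PySem.Chars.isalpha cn.1 <;> simp [hd, ha]

-- A's two sequential ifs equal componentwise addition of 0/1 indicators
theorem pv_a_fold (cs : List Char) (a b : Int) :
    cs.foldl (fun p char =>
        let special_chars := if !(PySem.Chars.isalpha char) && !(PySem.Chars.isdigit char)
                             then p.1 + 1 else p.1
        let digits := if PySem.Chars.isdigit char then p.2 + 1 else p.2
        (special_chars, digits)) (a, b)
      = cs.foldl (fun p char =>
          (p.1 + (if !(PySem.Chars.isalpha char) && !(PySem.Chars.isdigit char) then (1:Int) else 0),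
           p.2 + (if PySem.Chars.isdigit char then (1:Int) else 0))) (a, b) := by
  induction cs generalizing a b with
  | nil => rfl
  | cons c rest ih =>
    simp only [List.foldl_cons]
    rw [ih]
    by_cases hd : PySem.Chars.isdigit c <;>
      by_cases ha : PySem.Chars.isalpha c <;> simp [hd, ha]

-- ===== VERDICT (by name: the statement is the Claim_ definition above) =====
theorem count_string_characters_spec : Claim_equal_count_string_characters := by
  intro string _
  show count_string_characters string = count_string_characters_alt string
  unfold count_string_characters count_string_characters_alt
  set cs := PySem.Chars.replace string.toList [' '] [] with hcs
  simp only [pv_freq_items, pv_alt_fold, pv_a_fold]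
  rw [pv_foldl_pair_add (fun char => if !(PySem.Chars.isalpha char) && !(PySem.Chars.isdigit char) then (1:Int) else 0)
      (fun char => if PySem.Chars.isdigit char then (1:Int) else 0) cs 0 0,
    pv_foldl_pair_add (fun cn => if !(PySem.Chars.isalpha cn.1) && !(PySem.Chars.isdigit cn.1) then cn.2 else 0)
      (fun cn => if PySem.Chars.isdigit cn.1 then cn.2 else 0)
      ((PySem.Set.ofList cs).map (fun k => (k, (cs.count k : Int)))) 0 0]
  simp only [List.map_map, Function.comp_def]
  have hnd := PySem.Set.nodup_ofList (xs := cs)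
  have hcov : ∀ c ∈ cs, c ∈ PySem.Set.ofList cs := fun c hc =>
    (PySem.Set.mem_ofList cs c).mpr hc
  simp only [Prod.mk.injEq]
  refine ⟨trivial, ?_, ?_, ?_⟩
  · simp [PySem.Set.len, PySem.List.len_eq]
  · exact congrArg (0 + ·)
      (pv_sum_count (fun c => !(PySem.Chars.isalpha c) && !(PySem.Chars.isdigit c)) cs _ hnd hcov).symm
  · exact congrArg (0 + ·)
      (pv_sum_count (fun c => PySem.Chars.isdigit c) cs _ hnd hcov).symm
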